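-- pv_equiv track=rewrite | github.com/maua-maua-maua/maua | perceptors/vgg_kbc.py | _get_min_size
-- ===== SOURCE A (Python) =====
-- from typing import Dict, List
--
-- def _get_min_size(layers: List[int]):
--     last_layer = max(layers)
--     min_size = 1
--     for layer in [4, 9, 18, 27, 36]:
--         if last_layer < layer:
--             break
--         min_size *= 2
--     return min_size
-- ===== SOURCE B (Python) =====
-- from typing import Dict, List
--
-- def _layer_size(layer: int) -> int:
--     # minimum image size a single layer index demands
--     if layer < 4:
--         return 1
--     if layer < 9:
--         return 2
--     if layer < 18:
--         return 4
--     if layer < 27: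
--         return 8
--     if layer < 36:
--         return 16
--     return 32
--
-- def _get_min_size(layers: List[int]):
--     # size demanded by the deepest layer = max of per-layer demands,
--     # since _layer_size is monotone non-decreasing
--     return max(_layer_size(l) for l in layers)
-- ===== Notes on version B (the rewrite author's own statement) =====
-- stated objective: alternative
-- what changed: Instead of taking max(layers) and running a multiply-and-break scan over the threshold list, B classifies every layer index directly into its required size via a piecewise if-chain and returns the max of those sizes (correct since the size function is monotone, so max of images equals image of max); no threshold list or doubling accumulator exists in B.
import Mathlib
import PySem

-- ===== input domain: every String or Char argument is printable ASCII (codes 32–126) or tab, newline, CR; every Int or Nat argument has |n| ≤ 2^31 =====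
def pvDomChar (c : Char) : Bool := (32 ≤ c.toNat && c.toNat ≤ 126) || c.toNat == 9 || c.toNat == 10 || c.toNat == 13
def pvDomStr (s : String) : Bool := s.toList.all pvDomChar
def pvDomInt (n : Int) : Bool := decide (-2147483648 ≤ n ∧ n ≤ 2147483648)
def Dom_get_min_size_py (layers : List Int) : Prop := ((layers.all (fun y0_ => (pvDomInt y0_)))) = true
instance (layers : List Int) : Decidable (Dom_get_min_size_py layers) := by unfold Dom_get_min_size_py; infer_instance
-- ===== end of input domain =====

-- B: maps every layer index to its required size via a piecewise if-chain and takes the max of those sizes,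
-- instead of taking max(layers) and running the multiply-and-break threshold loop (alternative decomposition, same cost).
-- Pre_ excludes only the empty list, on which both A and B raise ValueError (max of empty sequence).


-- ===== PORT A =====
-- the for-loop with break: acc *= 2 until last_layer < layer
def pvLoopA (last : Int) : List Int → Int → Int
  | [], acc => acc
  | l :: ls, acc => if last < l then acc else pvLoopA last ls (acc * 2)

def get_min_size_py (layers : List Int) : Int :=
  match PySem.List.max? layers (fun x => x) with
  | none => 0   -- unreachable: max([]) raises, excluded by Pre_
  | some last_layer => pvLoopA last_layer [4, 9, 18, 27, 36] 1

-- ===== PORT B =====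
-- per-layer size demand: piecewise if-chain (Source B's _layer_size)
def pvLayerSize (layer : Int) : Int :=
  if layer < 4 then 1
  else if layer < 9 then 2
  else if layer < 18 then 4
  else if layer < 27 then 8
  else if layer < 36 then 16
  else 32

def get_min_size_py_alt (layers : List Int) : Int :=
  match PySem.List.max? (layers.map pvLayerSize) (fun x => x) with
  | none => 0   -- unreachable: max of empty generator raises, excluded by Pre_
  | some s => s

-- ===== PRECONDITION & SPEC =====
-- Pre_ excludes exactly the empty list, on which Python's max raises ValueError.
def Pre_get_min_size_py (layers : List Int) : Prop := layers ≠ []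
instance (layers : List Int) : Decidable (Pre_get_min_size_py layers) := by unfold Pre_get_min_size_py; infer_instance
def pvWitness_get_min_size_py : List Int := ([5])

def Spec_get_min_size_py (layers : List Int) (out : Int) : Prop := out = get_min_size_py_alt layers
instance (layers : List Int) (out : Int) : Decidable (Spec_get_min_size_py layers out) := by unfold Spec_get_min_size_py; infer_instance

-- ===== CLAIM (what is proved, stated in full; the proofs are below) =====
def Claim_equal_get_min_size_py : Prop := ∀ (layers : List Int), Dom_get_min_size_py layers → Pre_get_min_size_py layers → Spec_get_min_size_py layers (get_min_size_py layers)

-- ===== LEMMAS AND PROOFS =====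
-- A's threshold loop computes exactly the piecewise size function
theorem pvLoopA_eq_size (m : Int) : pvLoopA m [4, 9, 18, 27, 36] 1 = pvLayerSize m := by
  simp only [pvLoopA, pvLayerSize]
  split_ifs <;> first | rfl | omega

-- pvLayerSize distributes over max (it is monotone)
theorem pvLayerSize_max (a b : Int) : pvLayerSize (max a b) = max (pvLayerSize a) (pvLayerSize b) := by
  rcases le_total a b with h | h
  · rw [max_eq_right h, eq_comm, max_eq_right]
    unfold pvLayerSize; split_ifs <;> omega
  · rw [max_eq_left h, eq_comm, max_eq_left]
    unfold pvLayerSize; split_ifs <;> omega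

-- running max of mapped sizes = size of running max
theorem pv_fold (t : List Int) (x : Int) :
    (t.map pvLayerSize).foldl max (pvLayerSize x) = pvLayerSize (t.foldl max x) := by
  induction t generalizing x with
  | nil => rfl
  | cons y ys ih =>
    rw [List.map_cons, List.foldl_cons, List.foldl_cons, ← pvLayerSize_max, ih]

-- ===== VERDICT (by name: the statement is the Claim_ definition above) =====
theorem get_min_size_py_spec : Claim_equal_get_min_size_py := by
  intro layers _ hne
  unfold Spec_get_min_size_py get_min_size_py get_min_size_py_alt
  cases layers with
  | nil => exact absurd rfl hne
  | cons x t =>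
    rw [show (x :: t).map pvLayerSize = pvLayerSize x :: t.map pvLayerSize from rfl,
        PySem.List.max?_id_cons, PySem.List.max?_id_cons]
    simp only [pvLoopA_eq_size, pv_fold]
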